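-- pv_equiv track=rewrite | github.com/mamunur-ipe/HACO | example_functions.py | objective_function
-- ===== SOURCE A (Python) =====
-- def objective_function(xx):
--     outer = 0
--     for ii in range(d):
--         inner = 0
--         for jj in range(ii):
--             xj = xx[jj]
--             inner += xj ** 2
--         outer += inner
--
--     y = outer
--     return y
--
-- d = 5
-- ===== SOURCE B (Python) =====
-- d = 5
--
-- def objective_function(xx):
--     # closed form: element xx[jj] (jj < d-1) contributes to every outer
--     # iteration ii > jj, i.e. with multiplicity d-1-jj
--     return sum((d - 1 - jj) * xx[jj] ** 2 for jj in range(d - 1))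
-- ===== Notes on version B (the rewrite author's own statement) =====
-- stated objective: simpler
-- what changed: Replaces the nested double loop with a single pass using the closed-form multiplicity d-1-jj for each squared element.
import Mathlib
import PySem

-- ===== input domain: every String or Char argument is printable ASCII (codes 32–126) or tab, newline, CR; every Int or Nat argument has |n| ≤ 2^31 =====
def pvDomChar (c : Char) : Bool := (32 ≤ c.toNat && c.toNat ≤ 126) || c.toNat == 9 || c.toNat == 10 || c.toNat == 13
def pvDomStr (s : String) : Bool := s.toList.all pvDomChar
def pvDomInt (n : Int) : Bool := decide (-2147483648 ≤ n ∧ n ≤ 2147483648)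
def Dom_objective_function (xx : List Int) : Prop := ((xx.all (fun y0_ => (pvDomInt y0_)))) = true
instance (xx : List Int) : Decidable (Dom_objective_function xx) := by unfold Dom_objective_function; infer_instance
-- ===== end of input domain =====

-- ===== PORT A =====
-- B changes: nested double loop replaced by one pass with closed-form multiplicities (objective: simpler)
def objective_function (xx : List Int) : Int :=
  let outer := (PySem.List.pyRange 0 5 1).foldl (fun outer ii =>
    let inner := (PySem.List.pyRange 0 ii 1).foldl (fun inner jj =>
      inner + ((PySem.List.pyGet? xx jj).getD 0) ^ 2) 0
    outer + inner) 0
  outer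

-- ===== PORT B =====
def objective_function_alt (xx : List Int) : Int :=
  (PySem.List.pyRange 0 4 1).foldl (fun acc jj =>
    acc + (5 - 1 - jj) * ((PySem.List.pyGet? xx jj).getD 0) ^ 2) 0

-- ===== PRECONDITION & SPEC =====
-- Python A raises IndexError when len(xx) < 4 (it reads xx[0..3]); B raises there too.
def Pre_objective_function (xx : List Int) : Prop := 4 ≤ xx.length
instance (xx : List Int) : Decidable (Pre_objective_function xx) := by unfold Pre_objective_function; infer_instance
def pvWitness_objective_function : List Int := [1, 2, 3, 4]
def Spec_objective_function (xx : List Int) (out : Int) : Prop := out = objective_function_alt xx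
instance (xx : List Int) (out : Int) : Decidable (Spec_objective_function xx out) := by unfold Spec_objective_function; infer_instance

-- ===== CLAIM (what is proved, stated in full; the proofs are below) =====
def Claim_equal_objective_function : Prop := ∀ (xx : List Int), Dom_objective_function xx → Pre_objective_function xx → Spec_objective_function xx (objective_function xx)

-- ===== LEMMAS AND PROOFS =====
theorem range_eval : PySem.List.pyRange 0 5 1 = [0,1,2,3,4] ∧ PySem.List.pyRange 0 4 1 = [0,1,2,3] ∧ PySem.List.pyRange 0 3 1 = [0,1,2] ∧ PySem.List.pyRange 0 2 1 = [0,1] ∧ PySem.List.pyRange 0 1 1 = [0] ∧ PySem.List.pyRange 0 0 1 = [] := by decide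

-- ===== VERDICT (by name: the statement is the Claim_ definition above) =====
theorem objective_function_spec : Claim_equal_objective_function := by
  intro xx _ _
  unfold Spec_objective_function objective_function objective_function_alt
  simp [range_eval.1, range_eval.2.1, range_eval.2.2.1, range_eval.2.2.2.1,
        range_eval.2.2.2.2.1, range_eval.2.2.2.2.2, List.foldl]
  ring
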